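-- pv_equiv track=rewrite | github.com/chris-henry-holland/python-ProjectEulerSolutions | venv/lib/python3.11/site-packages/data_structures/suffix_array.py | encodeChars
-- ===== SOURCE A (Python) =====
-- from typing import (
--     Dict,
--     List,
--     Tuple,
--     Union,
-- )
--
-- def encodeChars(s: str, head_chars: str="") -> Dict[str, int]:
--     chars = set(s)
--     res = {}
--     i = 1
--     for l in head_chars:
--         if l in res.keys(): continue
--         res[l] = i
--         i += 1
--         chars.discard(l)
--     for i, l in enumerate(sorted(chars), start=i):
--         res[l] = i
--     return res
-- ===== SOURCE B (Python) =====
-- def encodeChars(s: str, head_chars: str = "") -> dict: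
--     # Rank every character with a single integer sort key: head characters rank
--     # by their first occurrence in head_chars (all < n), everything else ranks
--     # after them by code point (n + ord(c)); one sort of the whole character
--     # universe then yields the coding order, numbered once.
--     n = len(head_chars)
--
--     def key(c):
--         return head_chars.index(c) if c in head_chars else n + ord(c)
--
--     order = sorted(set(head_chars) | set(s), key=key)
--     return {c: r for r, c in enumerate(order, start=1)}
-- ===== Notes on version B (the rewrite author's own statement) =====
-- stated objective: alternative
-- what changed: Instead of A's two staged loops (counter-threading dedup of head_chars with set.discard, then enumerating the sorted leftovers), B assigns every character a single integer rank key (first-occurrence index for head chars, len(head_chars)+ord(c) for the rest) and does ONE sort of the whole character universe, numbering the result once.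
import Mathlib
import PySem

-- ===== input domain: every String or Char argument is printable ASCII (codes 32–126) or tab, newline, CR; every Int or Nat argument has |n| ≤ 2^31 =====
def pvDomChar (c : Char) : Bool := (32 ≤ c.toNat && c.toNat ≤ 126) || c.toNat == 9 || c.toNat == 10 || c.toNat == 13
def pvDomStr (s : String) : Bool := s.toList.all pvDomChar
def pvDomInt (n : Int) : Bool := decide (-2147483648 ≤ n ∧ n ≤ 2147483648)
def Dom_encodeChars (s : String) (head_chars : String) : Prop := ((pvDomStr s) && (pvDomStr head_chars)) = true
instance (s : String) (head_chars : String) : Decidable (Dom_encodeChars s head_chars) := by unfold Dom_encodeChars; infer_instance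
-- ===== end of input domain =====

-- B replaces A's two staged counter-threading loops by ONE sort of the whole character
-- universe under a single integer rank key (first-occurrence index for head chars,
-- len(head_chars)+ord(c) for the rest), numbered once.

-- ===== PORT A =====
-- chars = set(s); res = {}; i = 1
-- for l in head_chars: if l in res: continue; res[l] = i; i += 1; chars.discard(l)
-- for i, l in enumerate(sorted(chars), start=i): res[l] = i
def encodeChars (s : String) (head_chars : String) : List (String × Int) :=
  let chars : PySem.Set Char := PySem.Set.ofList s.toList
  let st :=
    head_chars.toList.foldl
      (fun (st : PySem.Dict String Int × Int × PySem.Set Char) l =>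
        if st.1.contains l.toString then st
        else (st.1.insert l.toString st.2.1, st.2.1 + 1, PySem.Set.discard st.2.2 l))
      (PySem.Dict.empty, 1, chars)
  let fin :=
    (PySem.List.sorted st.2.2 (fun x => x) false).foldl
      (fun (p : PySem.Dict String Int × Int) l => (p.1.insert l.toString p.2, p.2 + 1))
      (st.1, st.2.1)
  fin.1.items

-- ===== PORT B =====
-- n = len(head_chars)
-- key = lambda c: head_chars.index(c) if c in head_chars else n + ord(c)
-- order = sorted(set(head_chars) | set(s), key=key)
-- return {c: r for r, c in enumerate(order, start=1)}
def encodeChars_alt (s : String) (head_chars : String) : List (String × Int) :=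
  let n : Int := PySem.Str.len head_chars
  let key : Char → Int := fun c =>
    if head_chars.toList.contains c then
      -- exact: str.index cannot raise here — the branch guard is `c in head_chars`
      (((PySem.List.index? head_chars.toList c).getD 0 : Nat) : Int)
    else n + (c.toNat : Int)
  let order := PySem.List.sorted
      (PySem.Set.union (PySem.Set.ofList head_chars.toList) (PySem.Set.ofList s.toList))
      key false
  ((PySem.List.enumerate order 1).foldl
      (fun (d : PySem.Dict String Int) p => d.insert p.2.toString p.1)
      PySem.Dict.empty).items

-- ===== PRECONDITION & SPEC =====
def Spec_encodeChars (s : String) (head_chars : String) (out : List (String × Int)) : Prop := out = encodeChars_alt s head_chars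
instance (s : String) (head_chars : String) (out : List (String × Int)) : Decidable (Spec_encodeChars s head_chars out) := by unfold Spec_encodeChars; infer_instance

-- ===== CLAIM (what is proved, stated in full; the proofs are below) =====
def Claim_equal_encodeChars : Prop := ∀ (s : String) (head_chars : String), Dom_encodeChars s head_chars → Spec_encodeChars s head_chars (encodeChars s head_chars)

-- ===== LEMMAS AND PROOFS =====

-- the dict both programs end up with: the ordered key list `acc`, coded 1, 2, …
def mkD (acc : List Char) : PySem.Dict String Int :=
  PySem.Dict.mk ((acc.zipIdx 1).map (fun p => (p.1.toString, (p.2 : Int))))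

theorem toString_inj : Function.Injective Char.toString := by
  intro a b h
  simpa using congrArg String.toList h

theorem mkD_keys (acc : List Char) : (mkD acc).keys = acc.map Char.toString := by
  show ((acc.zipIdx 1).map (fun p => (p.1.toString, (p.2 : Int)))).map Prod.fst = _
  rw [List.map_map]
  conv_rhs => rw [← List.zipIdx_map_fst 1 acc, List.map_map]
  rfl

theorem mkD_contains (acc : List Char) (x : Char) :
    (mkD acc).contains x.toString = decide (x ∈ acc) := by
  rw [PySem.Dict.contains_eq_decide_mem_keys, mkD_keys]
  simp only [List.mem_map, toString_inj.eq_iff, exists_eq_right]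

theorem mkD_insert (acc : List Char) (x : Char) (hx : x ∉ acc) :
    (mkD acc).insert x.toString ((acc.length : Int) + 1) = mkD (acc ++ [x]) := by
  apply PySem.Dict.ext
  rw [PySem.Dict.items_insert_of_not_contains]
  · show (mkD acc).items ++ _ = ((acc ++ [x]).zipIdx 1).map _
    simp only [List.zipIdx_append, List.zipIdx_cons, List.zipIdx_nil, List.map_append,
      List.map_cons, List.map_nil]
    refine congrArg₂ _ rfl ?_
    have h1 : ((1 + acc.length : Nat) : Int) = (acc.length : Int) + 1 := by omega
    rw [h1]
  · rw [mkD_contains]; simp [hx]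

-- Python's enumerate(xs, start) with a Nat start, as zipIdx with the pair swapped
theorem enum_zipIdx (l : List Char) : ∀ (n : Nat),
    PySem.List.enumerate l (n : Int) = (l.zipIdx n).map (fun p => ((p.2 : Int), p.1)) := by
  induction l with
  | nil => intro n; simp [PySem.List.enumerate]
  | cons x t ih =>
    intro n
    simp [PySem.List.enumerate, List.zipIdx_cons]
    have := ih (n + 1)
    push_cast at this ⊢
    rw [this]

theorem discard_diff (S acc : List Char) (x : Char) :
    PySem.Set.discard (PySem.Set.diff S acc) x = PySem.Set.diff S (acc ++ [x]) := by
  simp only [PySem.Set.diff, PySem.Set.discard, List.filter_filter]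
  refine List.filter_congr (fun y _ => ?_)
  simp [Bool.and_comm, Bool.beq_eq_decide_eq]

theorem diff_congr (S a b : List Char) (h : ∀ y, y ∈ a ↔ y ∈ b) :
    PySem.Set.diff S a = PySem.Set.diff S b := by
  simp only [PySem.Set.diff]
  exact List.filter_congr (fun y _ => by simp [h y])

-- A's first loop: with `acc` already coded, it extends `acc` by the fresh chars of `l` in order
theorem loopA (l : List Char) : ∀ (acc S : List Char), acc.Nodup →
    l.foldl
      (fun (st : PySem.Dict String Int × Int × PySem.Set Char) c =>
        if st.1.contains c.toString then st
        else (st.1.insert c.toString st.2.1, st.2.1 + 1, PySem.Set.discard st.2.2 c))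
      (mkD acc, (acc.length : Int) + 1, PySem.Set.diff S acc)
    = (mkD (PySem.Set.update acc l), ((PySem.Set.update acc l).length : Int) + 1,
       PySem.Set.diff S (acc ++ l)) := by
  induction l with
  | nil => intro acc S _; simp [PySem.Set.update]
  | cons x t ih =>
    intro acc S hn
    simp only [List.foldl_cons]
    have hupd : PySem.Set.update acc (x :: t) = PySem.Set.update (PySem.Set.add acc x) t := rfl
    by_cases hx : x ∈ acc
    · rw [if_pos (by rw [mkD_contains]; simp [hx])]
      rw [ih acc S hn, hupd, PySem.Set.add_of_mem hx]
      simp only [Prod.mk.injEq, true_and]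
      refine diff_congr _ _ _ (fun y => ?_)
      simp only [List.mem_append, List.mem_cons]
      constructor
      · rintro (h | h) <;> tauto
      · rintro (h | rfl | h)
        · tauto
        · exact Or.inl hx
        · tauto
    · rw [if_neg (by rw [mkD_contains]; simp [hx])]
      have hn' : (acc ++ [x]).Nodup := by
        refine List.Nodup.append hn (List.nodup_singleton x) ?_
        intro a ha hb
        rw [List.mem_singleton] at hb
        exact hx (hb ▸ ha)
      rw [mkD_insert acc x hx, discard_diff]
      have hthis := ih (acc ++ [x]) S hn'
      have hstart : ((acc ++ [x]).length : Int) + 1 = (acc.length : Int) + 1 + 1 := by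
        simp
      rw [hstart] at hthis
      rw [hthis, hupd, PySem.Set.add_of_not_mem hx]
      simp

-- A's second loop: fresh distinct chars appended one by one, codes continuing
theorem loop2 (r : List Char) : ∀ acc : List Char, (∀ x ∈ r, x ∉ acc) → r.Nodup →
    r.foldl
      (fun (p : PySem.Dict String Int × Int) c => (p.1.insert c.toString p.2, p.2 + 1))
      (mkD acc, (acc.length : Int) + 1)
    = (mkD (acc ++ r), ((acc ++ r).length : Int) + 1) := by
  induction r with
  | nil => intro acc _ _; simp
  | cons x t ih =>
    intro acc hfresh hn
    simp only [List.foldl_cons]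
    rw [mkD_insert acc x (hfresh x (by simp))]
    have hfresh' : ∀ y ∈ t, y ∉ acc ++ [x] := by
      intro y hy
      simp only [List.mem_append, List.mem_singleton]
      rintro (h | rfl)
      · exact hfresh y (by simp [hy]) h
      · exact (List.nodup_cons.mp hn).1 hy
    have hlen : (acc.length : Int) + 1 + 1 = ((acc ++ [x]).length : Int) + 1 := by
      simp
    rw [hlen, ih (acc ++ [x]) hfresh' (List.nodup_cons.mp hn).2]
    simp

-- first-occurrence index, defaulted (B's key only uses it on members)
def idx (l : List Char) (c : Char) : Nat := (PySem.List.index? l c).getD 0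

theorem idx_lt_length (l : List Char) (c : Char) (hc : c ∈ l) : idx l c < l.length := by
  obtain ⟨k, hk⟩ := (PySem.List.index?_isSome_iff l c).mpr hc |> Option.isSome_iff_exists.mp
  obtain ⟨pre, suf, hl, hlen, -⟩ := (PySem.List.index?_eq_some_iff l c k).mp hk
  have hik : idx l c = k := by rw [idx, hk]; rfl
  rw [hik, hl, List.length_append, List.length_cons, ← hlen]
  omega

theorem idx_append_of_mem (l t : List Char) (c : Char) (hc : c ∈ l) :
    idx (l ++ t) c = idx l c := by
  unfold idx
  rw [PySem.List.index?_append_of_mem t hc]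

-- set(l) lists the distinct chars in strictly increasing first-occurrence order
theorem ofList_pairwise_idx (l : List Char) :
    (PySem.Set.ofList l).Pairwise (fun a b => idx l a < idx l b) := by
  induction l using List.reverseRecOn with
  | nil => simp [PySem.Set.ofList]
  | append_singleton l x ih =>
    have hof : PySem.Set.ofList (l ++ [x]) = PySem.Set.add (PySem.Set.ofList l) x := by
      rw [PySem.Set.ofList_eq_foldl, PySem.Set.ofList_eq_foldl, List.foldl_append]
      rfl
    by_cases hx : x ∈ l
    · rw [hof, PySem.Set.add_of_mem (by rwa [PySem.Set.mem_ofList])]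
      refine ih.imp_of_mem (fun {a b} ha hb hab => ?_)
      rw [PySem.Set.mem_ofList] at ha hb
      rwa [idx_append_of_mem l [x] a ha, idx_append_of_mem l [x] b hb]
    · rw [hof, PySem.Set.add_of_not_mem (by rwa [PySem.Set.mem_ofList])]
      rw [List.pairwise_append]
      refine ⟨ih.imp_of_mem (fun {a b} ha hb hab => ?_), by simp, ?_⟩
      · rw [PySem.Set.mem_ofList] at ha hb
        rwa [idx_append_of_mem l [x] a ha, idx_append_of_mem l [x] b hb]
      · intro a ha b hb
        rw [List.mem_singleton] at hb
        rw [PySem.Set.mem_ofList] at ha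
        rw [hb, idx_append_of_mem l [x] a ha]
        have hxl : idx (l ++ [x]) x = l.length := by
          unfold idx
          rw [PySem.List.index?_append_singleton_self l x hx]
          rfl
        rw [hxl]
        exact idx_lt_length l a ha

theorem encodeChars_spec : Claim_equal_encodeChars := by
  intro s h _
  show encodeChars s h = encodeChars_alt s h
  unfold encodeChars encodeChars_alt
  dsimp only
  -- A side: run the two loops
  have h0 : ((PySem.Dict.empty : PySem.Dict String Int), (1 : Int), PySem.Set.ofList s.toList)
      = (mkD [], ((([] : List Char).length : Int) + 1), PySem.Set.diff (PySem.Set.ofList s.toList) []) := by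
    simp [mkD, PySem.Set.diff, PySem.Dict.empty]
  rw [h0, loopA h.toList [] (PySem.Set.ofList s.toList) List.nodup_nil]
  have hhl : PySem.Set.update ([] : List Char) h.toList = PySem.Set.ofList h.toList := rfl
  have hnil : ([] : List Char) ++ h.toList = h.toList := rfl
  rw [hhl, hnil]
  set r := PySem.List.sorted (PySem.Set.diff (PySem.Set.ofList s.toList) h.toList) (fun x => x) false with hr
  have hfresh : ∀ x ∈ r, x ∉ PySem.Set.ofList h.toList := by
    intro x hx
    rw [hr, PySem.List.mem_sorted, PySem.Set.mem_diff] at hx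
    rw [PySem.Set.mem_ofList]
    exact hx.2
  have hnotinh : ∀ x ∈ r, x ∉ h.toList := by
    intro x hx
    have := hfresh x hx
    rwa [PySem.Set.mem_ofList] at this
  have hnr : r.Nodup := by
    rw [hr]
    exact ((PySem.List.sorted_perm _ _ _).nodup_iff).mpr
      (PySem.Set.nodup_diff _ _ (PySem.Set.nodup_ofList _))
  rw [loop2 r (PySem.Set.ofList h.toList) hfresh hnr]
  -- B side: the single sort produces exactly set(head) ++ r
  set key : Char → Int := fun c =>
    if h.toList.contains c then (((PySem.List.index? h.toList c).getD 0 : Nat) : Int)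
    else PySem.Str.len h + (c.toNat : Int) with hkey
  have hkey_head : ∀ c ∈ h.toList, key c = ((idx h.toList c : Nat) : Int) := by
    intro c hc
    simp only [hkey]
    rw [if_pos (by simpa using hc)]
    rfl
  have hkey_rest : ∀ c, c ∉ h.toList → key c = (h.toList.length : Int) + (c.toNat : Int) := by
    intro c hc
    simp only [hkey]
    rw [if_neg (by simpa using hc), PySem.Str.len_eq]
  have horder : PySem.List.sorted
      (PySem.Set.union (PySem.Set.ofList h.toList) (PySem.Set.ofList s.toList)) key false
      = PySem.Set.ofList h.toList ++ r := by
    apply PySem.List.sorted_eq_of_perm_of_pairwise_lt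
    · -- permutation: both are nodup with the same members
      refine (List.perm_ext_iff_of_nodup ?_ ?_).mpr (fun a => ?_)
      · refine List.Nodup.append (PySem.Set.nodup_ofList _) hnr ?_
        intro a ha hb
        exact hfresh a hb ha
      · exact PySem.Set.nodup_union _ _ (PySem.Set.nodup_ofList _)
      · have hrmem : a ∈ r ↔ a ∈ s.toList ∧ a ∉ h.toList := by
          rw [hr, PySem.List.mem_sorted, PySem.Set.mem_diff, PySem.Set.mem_ofList]
        simp only [List.mem_append, PySem.Set.mem_union, PySem.Set.mem_ofList, hrmem]
        tauto
    · -- strictly increasing key along set(head) ++ r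
      rw [List.pairwise_append]
      refine ⟨?_, ?_, ?_⟩
      · refine (ofList_pairwise_idx h.toList).imp_of_mem (fun {a b} ha hb hab => ?_)
        rw [PySem.Set.mem_ofList] at ha hb
        rw [hkey_head a ha, hkey_head b hb]
        exact_mod_cast hab
      · have hle := PySem.List.sorted_pairwise
          (PySem.Set.diff (PySem.Set.ofList s.toList) h.toList) (fun x => x)
        have hne : r.Pairwise (fun a b : Char => a ≠ b) := List.Nodup.pairwise_of_forall_ne hnr ?_
        · refine ((hr ▸ hle).and hne).imp_of_mem (fun {a b} ha hb hab => ?_)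
          rw [hkey_rest a (hnotinh a ha), hkey_rest b (hnotinh b hb)]
          have hlt : a < b := lt_of_le_of_ne hab.1 hab.2
          have : a.toNat < b.toNat := by
            exact Nat.lt_of_lt_of_le (by exact hlt) (le_refl _)
          omega
        · intro a ha b hb hne'
          exact hne'
      · intro a ha b hb
        rw [PySem.Set.mem_ofList] at ha
        rw [hkey_head a ha, hkey_rest b (hnotinh b hb)]
        have := idx_lt_length h.toList a ha
        have hb0 : 0 ≤ (b.toNat : Int) := Int.natCast_nonneg _
        omega
  rw [horder]
  -- both sides are now (mkD (set(head) ++ r)).items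
  rw [show (1 : Int) = ((1 : Nat) : Int) from rfl, enum_zipIdx, List.foldl_map]
  have hB := PySem.Dict.items_foldl_insert_fresh
      ((PySem.Set.ofList h.toList ++ r).zipIdx 1)
      (fun p => p.1.toString) (fun p => ((p.2 : Nat) : Int)) PySem.Dict.empty
      (fun p _ => by simp) ?hnodup
  case hnodup =>
    have hmap : ((PySem.Set.ofList h.toList ++ r).zipIdx 1).map (fun p => p.1.toString)
        = (PySem.Set.ofList h.toList ++ r).map Char.toString := by
      conv_rhs => rw [← List.zipIdx_map_fst 1 (PySem.Set.ofList h.toList ++ r), List.map_map]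
      rfl
    rw [hmap]
    refine List.Nodup.map toString_inj ?_
    rw [List.nodup_append]
    exact ⟨PySem.Set.nodup_ofList _, hnr, fun a ha b hb hab => hfresh b hb (hab ▸ ha)⟩
  rw [hB]
  rfl
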